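-- pv_equiv track=rewrite | github.com/dmyers2020/loan-simulator | loan_early_payment_simulator.py | calculate_maximum_repayment_period
-- ===== SOURCE A (Python) =====
-- def calculate_maximum_repayment_period(total_indebtedness):
--     max_periods = {
--         7500: 10,
--         10000: 12,
--         20000: 15,
--         40000: 20,
--         60000: 25,
--     }
--
--     for amount, periods in max_periods.items():
--         if total_indebtedness < amount:
--             return periods
--
--     return 30  # Default maximum repayment period
-- ===== SOURCE B (Python) =====
-- THRESHOLDS = [7500, 10000, 20000, 40000, 60000]
-- PERIODS = [10, 12, 15, 20, 25, 30]
--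
--
-- def calculate_maximum_repayment_period(total_indebtedness):
--     # binary search for the first threshold strictly greater than the input
--     lo, hi = 0, len(THRESHOLDS)
--     while lo < hi:
--         mid = (lo + hi) // 2
--         if THRESHOLDS[mid] <= total_indebtedness:
--             lo = mid + 1
--         else:
--             hi = mid
--     return PERIODS[lo]
-- ===== Notes on version B (the rewrite author's own statement) =====
-- stated objective: alternative
-- what changed: Replaces the linear scan over the dict of thresholds with a binary search (bisect_right-style while loop) over a sorted threshold list indexing a parallel periods list.
import Mathlib
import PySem

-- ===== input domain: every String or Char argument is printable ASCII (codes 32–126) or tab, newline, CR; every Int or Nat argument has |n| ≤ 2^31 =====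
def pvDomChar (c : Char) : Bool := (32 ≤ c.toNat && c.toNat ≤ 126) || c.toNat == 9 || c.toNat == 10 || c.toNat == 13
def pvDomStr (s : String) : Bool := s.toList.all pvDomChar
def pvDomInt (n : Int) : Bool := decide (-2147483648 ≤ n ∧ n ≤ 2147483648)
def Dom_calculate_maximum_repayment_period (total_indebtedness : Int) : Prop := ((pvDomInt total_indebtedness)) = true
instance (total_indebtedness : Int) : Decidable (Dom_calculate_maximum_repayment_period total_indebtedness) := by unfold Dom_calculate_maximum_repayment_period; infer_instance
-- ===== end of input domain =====

-- B replaces A's linear first-match scan over the threshold dict with a binary search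
-- over a sorted threshold list and a parallel periods list (objective: alternative).

-- ===== PORT A =====
-- A iterates the dict's items in insertion order and returns at the first threshold
-- strictly greater than the input; ported as a fold over the (amount, periods) pairs.
def pvMaxPeriods : List (Int × Int) :=
  [(7500, 10), (10000, 12), (20000, 15), (40000, 20), (60000, 25)]

def pvScan (total_indebtedness : Int) : List (Int × Int) → Int
  | [] => 30
  | (amount, periods) :: rest =>
      if total_indebtedness < amount then periods else pvScan total_indebtedness rest

def calculate_maximum_repayment_period (total_indebtedness : Int) : Int :=
  pvScan total_indebtedness pvMaxPeriods

-- ===== PORT B =====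
def pvThresholds : List Int := [7500, 10000, 20000, 40000, 60000]
def pvPeriods : List Int := [10, 12, 15, 20, 25, 30]

-- the while loop of Source B: narrow [lo, hi) until lo = hi
def pvBSearch (total_indebtedness : Int) (lo hi : Nat) : Nat :=
  if lo < hi then
    let mid := (lo + hi) / 2
    if pvThresholds.getD mid 0 ≤ total_indebtedness then
      pvBSearch total_indebtedness (mid + 1) hi
    else
      pvBSearch total_indebtedness lo mid
  else lo
termination_by hi - lo
decreasing_by all_goals omega

def calculate_maximum_repayment_period_alt (total_indebtedness : Int) : Int :=
  pvPeriods.getD (pvBSearch total_indebtedness 0 pvThresholds.length) 0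

-- ===== PRECONDITION & SPEC =====
def Spec_calculate_maximum_repayment_period (total_indebtedness : Int) (out : Int) : Prop := out = calculate_maximum_repayment_period_alt total_indebtedness
instance (total_indebtedness : Int) (out : Int) : Decidable (Spec_calculate_maximum_repayment_period total_indebtedness out) := by unfold Spec_calculate_maximum_repayment_period; infer_instance

-- ===== CLAIM (what is proved, stated in full; the proofs are below) =====
def Claim_equal_calculate_maximum_repayment_period : Prop := ∀ (total_indebtedness : Int), Dom_calculate_maximum_repayment_period total_indebtedness → Spec_calculate_maximum_repayment_period total_indebtedness (calculate_maximum_repayment_period total_indebtedness)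

-- ===== LEMMAS AND PROOFS =====

-- ===== VERDICT (by name: the statement is the Claim_ definition above) =====
theorem calculate_maximum_repayment_period_spec : Claim_equal_calculate_maximum_repayment_period := by
  intro t _
  unfold Spec_calculate_maximum_repayment_period
  unfold calculate_maximum_repayment_period calculate_maximum_repayment_period_alt
  by_cases h1 : t < 7500
  · simp [pvScan, pvMaxPeriods, pvBSearch, pvThresholds, pvPeriods, h1,
      show ¬((20000:Int) ≤ t) from by omega, show ¬((10000:Int) ≤ t) from by omega,
      show ¬((7500:Int) ≤ t) from by omega]
  · by_cases h2 : t < 10000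
    · simp [pvScan, pvMaxPeriods, pvBSearch, pvThresholds, pvPeriods, h1, h2,
        show ¬((20000:Int) ≤ t) from by omega, show ¬((10000:Int) ≤ t) from by omega,
        show ((7500:Int) ≤ t) from by omega]
    · by_cases h3 : t < 20000
      · simp [pvScan, pvMaxPeriods, pvBSearch, pvThresholds, pvPeriods, h1, h2, h3,
          show ¬((20000:Int) ≤ t) from by omega, show ((10000:Int) ≤ t) from by omega]
      · by_cases h4 : t < 40000
        · simp [pvScan, pvMaxPeriods, pvBSearch, pvThresholds, pvPeriods, h1, h2, h3, h4,
            show ((20000:Int) ≤ t) from by omega, show ¬((40000:Int) ≤ t) from by omega,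
            show ¬((60000:Int) ≤ t) from by omega]
        · by_cases h5 : t < 60000
          · simp [pvScan, pvMaxPeriods, pvBSearch, pvThresholds, pvPeriods, h1, h2, h3, h4, h5,
              show ((20000:Int) ≤ t) from by omega, show ((40000:Int) ≤ t) from by omega,
              show ¬((60000:Int) ≤ t) from by omega]
          · simp [pvScan, pvMaxPeriods, pvBSearch, pvThresholds, pvPeriods, h1, h2, h3, h4, h5,
              show ((20000:Int) ≤ t) from by omega, show ((60000:Int) ≤ t) from by omega]
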